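-- pv_equiv track=rewrite | github.com/danrasband/coding-experiment-reviews | responses/DPCKN2-NF5/find_maximum_product.py | solution
-- ===== SOURCE A (Python) =====
-- def solution(X, B):
--     if (len(B) == 0) | (X > len(B)):
--         return 0
--     else:
--         #sort the array in desc order
--         B.sort(reverse=True)
--
--         prod = 1
--         for index,intVal in enumerate(B):
--             if index <= X -1:
--                 prod = prod * intVal
--             else:
--                 break
--
--         return prod
-- ===== SOURCE B (Python) =====
-- import heapq
-- import math
--
--
-- def solution(X, B):
--     if len(B) == 0 or X > len(B):
--         return 0
--     return math.prod(heapq.nlargest(X, B))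
-- ===== Notes on version B (the rewrite author's own statement) =====
-- stated objective: idiomatic
-- what changed: Replaces the in-place full descending sort plus an enumerate loop with a break by heapq.nlargest(X, B) (heap selection of the X largest, O(n log X)) fed to math.prod; B also no longer mutates the caller's list.
import Mathlib
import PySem

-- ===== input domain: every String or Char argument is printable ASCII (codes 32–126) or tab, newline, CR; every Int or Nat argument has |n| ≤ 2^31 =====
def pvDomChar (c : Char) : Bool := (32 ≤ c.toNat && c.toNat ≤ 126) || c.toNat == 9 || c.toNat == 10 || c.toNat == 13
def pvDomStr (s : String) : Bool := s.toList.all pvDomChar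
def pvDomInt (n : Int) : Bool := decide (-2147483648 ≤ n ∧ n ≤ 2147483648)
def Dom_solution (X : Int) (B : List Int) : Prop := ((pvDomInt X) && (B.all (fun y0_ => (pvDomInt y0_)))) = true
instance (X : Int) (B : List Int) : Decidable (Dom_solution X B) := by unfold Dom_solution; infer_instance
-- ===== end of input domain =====

-- B replaces A's full descending sort + break-loop by heapq.nlargest(X, B) and math.prod
-- (objective: idiomatic; A also sorts B in place, B leaves it untouched — return values only are compared).

-- ===== PORT A =====
-- the 'for index,intVal in enumerate(B): if index <= X-1: prod *= intVal else: break' loop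
def solutionLoop (X : Int) : List (Int × Int) → Int → Int
  | [], prod => prod
  | (i, v) :: rest, prod => if i ≤ X - 1 then solutionLoop X rest (prod * v) else prod

def solution (X : Int) (B : List Int) : Int :=
  if (decide (B.length = 0) || decide (X > (B.length : Int))) then 0
  else
    let Bs := PySem.List.sorted B (fun x => x) true   -- B.sort(reverse=True)
    solutionLoop X (PySem.List.enumerate Bs) 1

-- ===== PORT B =====
-- heapq.nlargest(X, B) is documented as sorted(B, reverse=True)[:X]; math.prod is a fold of (*) from 1
def solution_alt (X : Int) (B : List Int) : Int :=
  if B.length = 0 ∨ X > (B.length : Int) then 0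
  else ((PySem.List.sorted B (fun x => x) true).take X.toNat).foldl (· * ·) 1

-- ===== PRECONDITION & SPEC =====
def Spec_solution (X : Int) (B : List Int) (out : Int) : Prop := out = solution_alt X B
instance (X : Int) (B : List Int) (out : Int) : Decidable (Spec_solution X B out) := by unfold Spec_solution; infer_instance

-- ===== CLAIM (what is proved, stated in full; the proofs are below) =====
def Claim_equal_solution : Prop := ∀ (X : Int) (B : List Int), Dom_solution X B → Spec_solution X B (solution X B)

-- ===== LEMMAS AND PROOFS =====
theorem solutionLoop_eq_take (X : Int) (l : List Int) :
    ∀ (s : Int) (p : Int),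
      solutionLoop X (PySem.List.enumerate l s) p = (l.take (X - s).toNat).foldl (· * ·) p := by
  induction l with
  | nil => intro s p; simp [PySem.List.enumerate_nil, solutionLoop]
  | cons x xs ih =>
    intro s p
    rw [PySem.List.enumerate_cons]
    change (if s ≤ X - 1 then solutionLoop X (PySem.List.enumerate xs (s + 1)) (p * x) else p) = _
    by_cases h : s ≤ X - 1
    · have h1 : (X - s).toNat = ((X - (s + 1)).toNat) + 1 := by omega
      rw [if_pos h, ih, h1, List.take_succ_cons, List.foldl_cons]
    · have h0 : (X - s).toNat = 0 := by omega
      rw [if_neg h, h0]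
      simp

-- ===== VERDICT (by name: the statement is the Claim_ definition above) =====
theorem solution_spec : Claim_equal_solution := by
  intro X B _
  unfold Spec_solution solution solution_alt
  by_cases h : B = [] ∨ (B.length : Int) < X
  · simp [h]
  · have key := solutionLoop_eq_take X (PySem.List.sorted B (fun x => x) true) 0 1
    simp only [sub_zero] at key
    simp [h, key]
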